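-- pv_equiv track=rewrite | github.com/kirimaru-jp/CLUZ_QGIS3 | cluz_functions3.py | checkPuShapeFileDuplicatePUIDValue
-- ===== SOURCE A (Python) =====
-- def checkPuShapeFileDuplicatePUIDValue(shapeErrorSet, puIDList):
--     puIDSet = set(puIDList)
--     duplicateIDText = 'The following planning unit ID values appear more than once in the Unit_ID field: '
--     if len(puIDList) != len(puIDSet):
--         shapeErrorSet.add('duplicateFeatID')
--         duplicateSet = set([x for x in puIDList if puIDList.count(x) > 1])
--         duplicateList = list(duplicateSet)
--         duplicateList.sort()
--         for aNum in duplicateList: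
--             duplicateIDText += str(aNum) + ', '
--         duplicateIDText = duplicateIDText[0:-2]
--
--     return shapeErrorSet, puIDSet, duplicateIDText
-- ===== SOURCE B (Python) =====
-- def checkPuShapeFileDuplicatePUIDValue(shapeErrorSet, puIDList):
--     puIDSet = set(puIDList)
--     duplicateIDText = 'The following planning unit ID values appear more than once in the Unit_ID field: '
--     srt = sorted(puIDList)
--     dups = []
--     i = 0
--     n = len(srt)
--     while i < n:
--         j = i + 1
--         while j < n and srt[j] == srt[i]:
--             j += 1
--         if j - i > 1:
--             dups.append(srt[i])
--         i = j
--     if dups: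
--         shapeErrorSet.add('duplicateFeatID')
--         duplicateIDText += ', '.join(str(x) for x in dups)
--     return shapeErrorSet, puIDSet, duplicateIDText
-- ===== Notes on version B (the rewrite author's own statement) =====
-- stated objective: faster
-- what changed: Instead of comparing len(list) with len(set) and filtering by the quadratic puIDList.count(x) > 1 re-scan, B sorts the list once and extracts the duplicate values by scanning equal-value runs of the sorted list (a run longer than 1 is a duplicate), which also yields them already sorted; the error text is then assembled with ', '.join instead of append-then-chop.
import Mathlib
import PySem

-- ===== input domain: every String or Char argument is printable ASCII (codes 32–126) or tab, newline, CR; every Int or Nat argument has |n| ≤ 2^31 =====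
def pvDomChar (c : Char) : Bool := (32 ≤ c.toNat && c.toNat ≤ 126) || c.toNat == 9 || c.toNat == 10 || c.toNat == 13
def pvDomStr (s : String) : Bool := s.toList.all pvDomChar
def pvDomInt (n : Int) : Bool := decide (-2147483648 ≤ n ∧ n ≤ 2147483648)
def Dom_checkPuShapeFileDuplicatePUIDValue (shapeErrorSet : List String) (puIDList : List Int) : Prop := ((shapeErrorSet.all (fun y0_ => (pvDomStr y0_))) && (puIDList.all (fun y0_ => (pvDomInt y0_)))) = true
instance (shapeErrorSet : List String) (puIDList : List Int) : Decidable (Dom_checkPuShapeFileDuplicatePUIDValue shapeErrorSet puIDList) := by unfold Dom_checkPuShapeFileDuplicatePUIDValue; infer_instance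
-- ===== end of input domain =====

-- B replaces A's len(list)-vs-len(set) guard and quadratic count-filter by a sort-then-run-scan:
-- it sorts the list once and collects the head of every equal-value run longer than 1 (already in
-- sorted order), joining the text with ', ' (objective: faster). Both A and B mutate the
-- shapeErrorSet argument (set.add) identically; the equivalence proved is about the return value.

-- ===== PORT A =====
def pvPrefix : List Char := "The following planning unit ID values appear more than once in the Unit_ID field: ".toList

def checkPuShapeFileDuplicatePUIDValue (shapeErrorSet : List String) (puIDList : List Int) : List String × List Int × String :=
  let puIDSet : PySem.Set Int := PySem.Set.ofList puIDList
  if puIDList.length ≠ PySem.Set.len puIDSet then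
    let shapeErrorSet' := PySem.Set.add shapeErrorSet "duplicateFeatID"
    let duplicateSet : PySem.Set Int := PySem.Set.ofList (puIDList.filter (fun x => decide (1 < PySem.List.count puIDList x)))
    -- list(duplicateSet); duplicateList.sort()  — the sorted elements of the set
    let duplicateList := PySem.List.sorted duplicateSet (fun x => x) false
    let txt := duplicateList.foldl (fun acc n => acc ++ (PySem.Int.toChars n ++ (", ".toList))) pvPrefix
    let txt := PySem.List.slice txt (some 0) (some (-2))
    (shapeErrorSet', puIDSet, String.ofList txt)
  else
    (shapeErrorSet, puIDSet, String.ofList pvPrefix)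

-- ===== PORT B =====
-- the inner while loop: scan the equal-value runs of the (sorted) list, keep heads of runs > 1
def pvRuns : List Int → List Int
  | [] => []
  | a :: t =>
    if (t.takeWhile (fun x => x == a)) = [] then pvRuns (t.dropWhile (fun x => x == a))
    else a :: pvRuns (t.dropWhile (fun x => x == a))
termination_by l => l.length
decreasing_by
  all_goals
    simp only [List.length_cons]
    have := List.length_dropWhile_le (fun x => x == a) t
    omega

def checkPuShapeFileDuplicatePUIDValue_alt (shapeErrorSet : List String) (puIDList : List Int) : List String × List Int × String :=
  let puIDSet : PySem.Set Int := PySem.Set.ofList puIDList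
  let dups := pvRuns (PySem.List.sorted puIDList (fun x => x) false)
  if dups ≠ [] then
    (PySem.Set.add shapeErrorSet "duplicateFeatID", puIDSet,
     String.ofList (pvPrefix ++ PySem.Chars.join (", ".toList) (dups.map PySem.Int.toChars)))
  else
    (shapeErrorSet, puIDSet, String.ofList pvPrefix)

-- ===== PRECONDITION & SPEC =====
def Spec_checkPuShapeFileDuplicatePUIDValue (shapeErrorSet : List String) (puIDList : List Int) (out : List String × List Int × String) : Prop := out = checkPuShapeFileDuplicatePUIDValue_alt shapeErrorSet puIDList
instance (shapeErrorSet : List String) (puIDList : List Int) (out : List String × List Int × String) : Decidable (Spec_checkPuShapeFileDuplicatePUIDValue shapeErrorSet puIDList out) := by unfold Spec_checkPuShapeFileDuplicatePUIDValue; infer_instance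

-- ===== CLAIM (what is proved, stated in full; the proofs are below) =====
def Claim_equal_checkPuShapeFileDuplicatePUIDValue : Prop := ∀ (shapeErrorSet : List String) (puIDList : List Int), Dom_checkPuShapeFileDuplicatePUIDValue shapeErrorSet puIDList → Spec_checkPuShapeFileDuplicatePUIDValue shapeErrorSet puIDList (checkPuShapeFileDuplicatePUIDValue shapeErrorSet puIDList)

-- ===== LEMMAS AND PROOFS =====

-- set(l) is a sublist of l
theorem pv_ofList_sublist (l : List Int) : (PySem.Set.ofList l).Sublist l := by
  induction l using List.reverseRecOn with
  | nil => simp [PySem.Set.ofList_nil]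
  | append_singleton xs x ih =>
    rw [PySem.Set.ofList_append_singleton, PySem.Set.add_eq_ite]
    split_ifs
    · exact ih.trans (List.sublist_append_left xs [x])
    · exact List.Sublist.append ih (List.Sublist.refl [x])

-- the run scan on a ≤-sorted list: strictly increasing, and exactly the values of count ≥ 2
theorem pv_runs_spec (s : List Int) (hs : s.Pairwise (· ≤ ·)) :
    (pvRuns s).Pairwise (· < ·) ∧ ∀ x, x ∈ pvRuns s ↔ 2 ≤ s.count x := by
  induction s using pvRuns.induct with
  | case1 => refine ⟨?_, fun x => ?_⟩ <;> simp [pvRuns]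
  | case2 a t hcond ih =>
    -- no run: a occurs once
    have hsplit := List.takeWhile_append_dropWhile (p := fun x => x == a) (l := t)
    have hrest_pw : (t.dropWhile (fun x => x == a)).Pairwise (· ≤ ·) :=
      List.Pairwise.sublist (List.dropWhile_sublist _) hs.of_cons
    have hle : ∀ x ∈ t.dropWhile (fun x => x == a), a ≤ x := fun x hx =>
      (List.pairwise_cons.1 hs).1 x ((List.dropWhile_sublist _).subset hx)
    have hgt : ∀ x ∈ t.dropWhile (fun x => x == a), a < x := by
      intro x hx
      rcases lt_or_eq_of_le (hle x hx) with h | h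
      · exact h
      · exfalso
        cases hdw : t.dropWhile (fun x => x == a) with
        | nil => rw [hdw] at hx; exact (List.not_mem_nil) hx
        | cons h0 r =>
          have hh0 : ¬ ((h0 == a) = true) := by
            have := List.head?_dropWhile_not (p := fun x => x == a) (l := t)
            rw [hdw] at this; simpa using this
          rw [hdw] at hx
          rcases List.mem_cons.1 hx with rfl | hxr
          · exact hh0 (by simp [← h])
          · have h1 : h0 ≤ x := (List.pairwise_cons.1 (hdw ▸ hrest_pw)).1 x hxr
            have h2 : a ≤ h0 := hle h0 (hdw ▸ List.mem_cons_self)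
            exact hh0 (by simp; omega)
    obtain ⟨ihp, ihm⟩ := ih hrest_pw
    rw [pvRuns, if_pos hcond]
    refine ⟨ihp, fun x => ?_⟩
    rw [ihm x]
    have hteq : t = t.dropWhile (fun x => x == a) := by
      conv_lhs => rw [← hsplit]
      rw [hcond, List.nil_append]
    by_cases hxa : x = a
    · subst hxa
      have h0 : t.count x = (t.dropWhile (fun y => y == x)).count x := by rw [← hteq]
      have hnm : x ∉ t.dropWhile (fun y => y == x) := fun hm => absurd (hgt x hm) (lt_irrefl x)
      rw [List.count_cons_self, ← hteq]
      have := List.count_eq_zero.2 hnm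
      constructor
      · intro h2; omega
      · intro h2; omega
    · rw [List.count_cons_of_ne (by simpa using Ne.symm hxa)]
      constructor <;> intro h
      · rwa [← hteq] at h
      · rwa [hteq] at h
  | case3 a t hcond ih =>
    have hsplit := List.takeWhile_append_dropWhile (p := fun x => x == a) (l := t)
    have hrest_pw : (t.dropWhile (fun x => x == a)).Pairwise (· ≤ ·) :=
      List.Pairwise.sublist (List.dropWhile_sublist _) hs.of_cons
    have hle : ∀ x ∈ t.dropWhile (fun x => x == a), a ≤ x := fun x hx =>
      (List.pairwise_cons.1 hs).1 x ((List.dropWhile_sublist _).subset hx)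
    have hgt : ∀ x ∈ t.dropWhile (fun x => x == a), a < x := by
      intro x hx
      rcases lt_or_eq_of_le (hle x hx) with h | h
      · exact h
      · exfalso
        cases hdw : t.dropWhile (fun x => x == a) with
        | nil => rw [hdw] at hx; exact (List.not_mem_nil) hx
        | cons h0 r =>
          have hh0 : ¬ ((h0 == a) = true) := by
            have := List.head?_dropWhile_not (p := fun x => x == a) (l := t)
            rw [hdw] at this; simpa using this
          rw [hdw] at hx
          rcases List.mem_cons.1 hx with rfl | hxr
          · exact hh0 (by simp [← h])
          · have h1 : h0 ≤ x := (List.pairwise_cons.1 (hdw ▸ hrest_pw)).1 x hxr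
            have h2 : a ≤ h0 := hle h0 (hdw ▸ List.mem_cons_self)
            exact hh0 (by simp; omega)
    obtain ⟨ihp, ihm⟩ := ih hrest_pw
    rw [pvRuns, if_neg hcond]
    have htake : ∀ x ∈ t.takeWhile (fun x => x == a), x = a := fun x hx => by
      simpa using List.mem_takeWhile_imp hx
    have hcnt_take : (t.takeWhile (fun x => x == a)).count a = (t.takeWhile (fun x => x == a)).length := by
      apply List.count_eq_length.2
      intro x hx; simp [htake x hx]
    have hcnt_t : ∀ x, t.count x = (t.takeWhile (fun y => y == a)).count x + (t.dropWhile (fun y => y == a)).count x := by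
      intro x
      conv_lhs => rw [← hsplit]
      rw [List.count_append]
    constructor
    · refine List.pairwise_cons.2 ⟨?_, ihp⟩
      intro y hy
      have h2 : 2 ≤ (t.dropWhile (fun x => x == a)).count y := (ihm y).1 hy
      have hmy : y ∈ t.dropWhile (fun x => x == a) := List.count_pos_iff.1 (by omega)
      exact hgt y hmy
    · intro x
      rw [List.mem_cons, ihm x]
      by_cases hxa : x = a
      · subst hxa
        have hnm : x ∉ t.dropWhile (fun y => y == x) := fun hm => absurd (hgt x hm) (lt_irrefl x)
        have hz := List.count_eq_zero.2 hnm
        have hne : (t.takeWhile (fun y => y == x)).length ≥ 1 := by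
          cases hq : t.takeWhile (fun y => y == x) with
          | nil => exact absurd hq hcond
          | cons _ _ => simp
        rw [List.count_cons_self, hcnt_t x, hcnt_take, hz]
        constructor
        · intro _; omega
        · intro _; left; rfl
      · have hc0 : (t.takeWhile (fun y => y == a)).count x = 0 :=
          List.count_eq_zero.2 (fun hm => hxa (htake x hm))
        rw [List.count_cons_of_ne (by simpa using Ne.symm hxa), hcnt_t x, hc0]
        simp only [Nat.zero_add]
        constructor
        · rintro (h | h)
          · exact absurd h hxa
          · exact h
        · intro h; exact Or.inr h

-- B's run scan of the sorted list equals A's sorted duplicate set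
theorem pv_runs_eq (l : List Int) :
    PySem.List.sorted (PySem.Set.ofList (l.filter (fun x => decide (1 < PySem.List.count l x)))) (fun x => x) false
      = pvRuns (PySem.List.sorted l (fun x => x) false) := by
  have hs : (PySem.List.sorted l (fun x => x) false).Pairwise (· ≤ ·) :=
    PySem.List.sorted_pairwise l (fun x => x)
  obtain ⟨hp, hm⟩ := pv_runs_spec _ hs
  refine PySem.List.sorted_eq_of_perm_of_pairwise_lt _ _ _ ?_ hp
  refine (List.perm_ext_iff_of_nodup (hp.imp (fun h => ne_of_lt h)) (PySem.Set.nodup_ofList _)).2 fun x => ?_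
  rw [hm x, PySem.Set.mem_ofList, List.mem_filter]
  have hcnt : (PySem.List.sorted l (fun x => x) false).count x = l.count x :=
    (PySem.List.sorted_perm l (fun x => x) false).count_eq x
  rw [hcnt]
  simp only [PySem.List.count_eq, decide_eq_true_eq]
  constructor
  · intro h; exact ⟨List.count_pos_iff.1 (by omega), by omega⟩
  · rintro ⟨_, h⟩; omega

-- the branch conditions agree: a run of length > 1 exists iff len(list) ≠ len(set)
theorem pv_branch (l : List Int) :
    (pvRuns (PySem.List.sorted l (fun x => x) false) ≠ []) ↔
      l.length ≠ PySem.Set.len (PySem.Set.ofList l) := by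
  have hs : (PySem.List.sorted l (fun x => x) false).Pairwise (· ≤ ·) :=
    PySem.List.sorted_pairwise l (fun x => x)
  obtain ⟨_, hm⟩ := pv_runs_spec _ hs
  have hcnt : ∀ x, (PySem.List.sorted l (fun x => x) false).count x = l.count x :=
    fun x => (PySem.List.sorted_perm l (fun x => x) false).count_eq x
  constructor
  · intro hne heq
    obtain ⟨x, hx⟩ := List.exists_mem_of_ne_nil _ hne
    have h2 : 2 ≤ l.count x := by rw [← hcnt x]; exact (hm x).1 hx
    have hnd : ¬ l.Nodup :=
      List.exists_duplicate_iff_not_nodup.1 ⟨x, List.duplicate_iff_two_le_count.2 h2⟩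
    apply hnd
    have hlen : (PySem.Set.ofList l).length = l.length := by
      simpa [PySem.Set.len] using heq.symm
    have : PySem.Set.ofList l = l := (pv_ofList_sublist l).eq_of_length hlen
    rw [← this]
    exact PySem.Set.nodup_ofList l
  · intro h hnil
    have hnd : ¬ l.Nodup := by
      intro hn
      apply h
      rw [PySem.Set.ofList_eq_self_of_nodup l hn]
      simp [PySem.Set.len]
    obtain ⟨x, hx⟩ := List.exists_duplicate_iff_not_nodup.2 hnd
    have h2 : 2 ≤ l.count x := List.duplicate_iff_two_le_count.1 hx
    have : x ∈ pvRuns (PySem.List.sorted l (fun x => x) false) := (hm x).2 (by rw [hcnt x]; exact h2)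
    rw [hnil] at this
    exact (List.not_mem_nil) this

-- a run of 'f x ++ sep' blocks is the sep-join plus one trailing sep
theorem pv_flatMap_sep (f : Int → List Char) (sep : List Char) (l : List Int) (hl : l ≠ []) :
    l.flatMap (fun n => f n ++ sep) = PySem.Chars.join sep (l.map f) ++ sep := by
  induction l with
  | nil => exact absurd rfl hl
  | cons a t ih =>
    cases t with
    | nil => simp [PySem.Chars.join_singleton]
    | cons b u =>
      rw [List.flatMap_cons, ih (by simp)]
      simp only [List.map_cons]
      rw [PySem.Chars.join_cons_cons]
      simp

-- append-then-chop equals join, for a nonempty list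
theorem pv_text_eq (l : List Int) (hl : l ≠ []) (pre : List Char) :
    PySem.List.slice
      (l.foldl (fun acc n => acc ++ (PySem.Int.toChars n ++ (", ".toList))) pre)
      (some 0) (some (-2))
    = pre ++ PySem.Chars.join (", ".toList) (l.map PySem.Int.toChars) := by
  rw [PySem.List.foldl_append_eq_flatMap]
  rw [pv_flatMap_sep _ _ _ hl, ← List.append_assoc]
  rw [PySem.List.slice_zero_start, PySem.List.slice_to_neg_ofNat _ 2 (by omega)]
  have hlen : ((pre ++ PySem.Chars.join (", ".toList) (l.map PySem.Int.toChars)) ++ (", ".toList)).length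
      = (pre ++ PySem.Chars.join (", ".toList) (l.map PySem.Int.toChars)).length + 2 := by
    simp
    omega
  rw [hlen, Nat.add_sub_cancel, List.take_left]

-- ===== VERDICT (by name: the statement is the Claim_ definition above) =====
theorem checkPuShapeFileDuplicatePUIDValue_spec : Claim_equal_checkPuShapeFileDuplicatePUIDValue := by
  intro shapeErrorSet puIDList _
  unfold Spec_checkPuShapeFileDuplicatePUIDValue
  unfold checkPuShapeFileDuplicatePUIDValue checkPuShapeFileDuplicatePUIDValue_alt
  dsimp only
  by_cases h : puIDList.length ≠ PySem.Set.len (PySem.Set.ofList puIDList)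
  · have hb : pvRuns (PySem.List.sorted puIDList (fun x => x) false) ≠ [] := (pv_branch puIDList).2 h
    rw [if_pos h, if_pos hb]
    refine Prod.ext rfl (Prod.ext rfl ?_)
    have hsne : PySem.List.sorted (PySem.Set.ofList (puIDList.filter (fun x => decide (1 < PySem.List.count puIDList x)))) (fun x => x) false ≠ [] := by
      rw [pv_runs_eq]; exact hb
    rw [pv_text_eq _ hsne, pv_runs_eq]
  · have hb : ¬ (pvRuns (PySem.List.sorted puIDList (fun x => x) false) ≠ []) :=
      fun hc => h ((pv_branch puIDList).1 hc)
    rw [if_neg h, if_neg hb]
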